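-- pv_equiv track=rewrite | github.com/quinns1/Metaheuristics | Various Optimization Problems/Queens.py | getHeuristicCostQueen
-- ===== SOURCE A (Python) =====
-- import math
--
-- def getHeuristicCostQueen(candidate, queenId):
--     conflicts = 0
--     for index in range(0, len(candidate)):
--         if queenId == index:
--             continue
--         if ((candidate[queenId] == candidate[index]) or math.fabs(candidate[queenId] - candidate[index]) == math.fabs(index - queenId) ):
--             conflicts += 1
--     return conflicts
-- ===== SOURCE B (Python) =====
-- def getHeuristicCostQueen(candidate, queenId):
--     if not candidate:
--         return 0
--     row = candidate[queenId]
--     rows = {}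
--     main = {}
--     anti = {}
--     for i, v in enumerate(candidate):
--         rows[v] = rows.get(v, 0) + 1
--         main[v - i] = main.get(v - i, 0) + 1
--         anti[v + i] = anti.get(v + i, 0) + 1
--     return rows.get(row, 0) + main.get(row - queenId, 0) + anti.get(row + queenId, 0) - 3
-- ===== Notes on version B (the rewrite author's own statement) =====
-- stated objective: alternative
-- what changed: Replaces A's per-index loop testing |value diff| == |index diff| with one pass that builds three hash-map counters keyed by row (value), main diagonal (value - index) and anti-diagonal (value + index), then answers counts[row]+counts[row-queenId]+counts[row+queenId]-3.
-- outside the precondition, e.g. on getHeuristicCostQueen([0, 1], -1): A returns 2, B returns -1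
import Mathlib
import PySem

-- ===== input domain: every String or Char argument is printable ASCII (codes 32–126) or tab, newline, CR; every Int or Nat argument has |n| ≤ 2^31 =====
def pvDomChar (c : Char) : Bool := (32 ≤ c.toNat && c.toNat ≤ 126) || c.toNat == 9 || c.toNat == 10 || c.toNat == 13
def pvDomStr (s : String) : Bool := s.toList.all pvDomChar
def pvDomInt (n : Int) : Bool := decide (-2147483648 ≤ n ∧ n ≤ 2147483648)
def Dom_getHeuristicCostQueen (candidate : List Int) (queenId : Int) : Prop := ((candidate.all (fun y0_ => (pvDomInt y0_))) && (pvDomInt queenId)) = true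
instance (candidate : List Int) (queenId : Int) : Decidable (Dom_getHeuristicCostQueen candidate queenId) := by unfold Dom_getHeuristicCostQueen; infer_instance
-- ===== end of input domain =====

-- B replaces A's per-index scan by three one-pass hash-map counters (row / value-index / value+index);
-- same cost class, different data structure. Equivalent on non-negative in-range queenId (and the empty board).


-- ===== PORT A =====
-- math.fabs compares |Int| values; exact for |n| ≤ 2^31, ported as Int.natAbs equality.
def getHeuristicCostQueen (candidate : List Int) (queenId : Int) : Int :=
  (PySem.List.pyRange 0 (candidate.length : Int) 1).foldl
    (fun conflicts index =>
      if queenId == index then conflicts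
      else
        let cq := PySem.List.pyGetD candidate queenId 0   -- IndexError excluded by Pre_
        let ci := PySem.List.pyGetD candidate index 0
        if cq == ci || (cq - ci).natAbs == (index - queenId).natAbs then conflicts + 1
        else conflicts)
    0

-- ===== PORT B =====
def getHeuristicCostQueen_alt (candidate : List Int) (queenId : Int) : Int :=
  if candidate = [] then 0
  else
    let row := PySem.List.pyGetD candidate queenId 0   -- IndexError excluded by Pre_
    let st :=
      (PySem.List.enumerate candidate).foldl
        (fun (st : PySem.Dict Int Int × PySem.Dict Int Int × PySem.Dict Int Int) iv =>
          (st.1.modify iv.2 0 (· + 1),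
           st.2.1.modify (iv.2 - iv.1) 0 (· + 1),
           st.2.2.modify (iv.2 + iv.1) 0 (· + 1)))
        (PySem.Dict.empty, PySem.Dict.empty, PySem.Dict.empty)
    st.1.getD row 0 + st.2.1.getD (row - queenId) 0 + st.2.2.getD (row + queenId) 0 - 3

-- ===== PRECONDITION & SPEC =====
-- Pre_ excludes (a) out-of-range queenId on a non-empty list, where A raises IndexError, and
-- (b) negative in-range queenId, outside the natural domain of a board index, where both results are
-- accidents of Python's negative-index wraparound (A even counts the queen as conflicting with itself)
-- and no caller would specify either value.
def Pre_getHeuristicCostQueen (candidate : List Int) (queenId : Int) : Prop :=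
  candidate = [] ∨ (0 ≤ queenId ∧ queenId < (candidate.length : Int))
instance (candidate : List Int) (queenId : Int) : Decidable (Pre_getHeuristicCostQueen candidate queenId) := by unfold Pre_getHeuristicCostQueen; infer_instance

def pvWitness_getHeuristicCostQueen : List Int × Int := ([2, 0, 3, 1], 1)

def Spec_getHeuristicCostQueen (candidate : List Int) (queenId : Int) (out : Int) : Prop := out = getHeuristicCostQueen_alt candidate queenId
instance (candidate : List Int) (queenId : Int) (out : Int) : Decidable (Spec_getHeuristicCostQueen candidate queenId out) := by unfold Spec_getHeuristicCostQueen; infer_instance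

-- ===== CLAIM (what is proved, stated in full; the proofs are below) =====
def Claim_equal_getHeuristicCostQueen : Prop := ∀ (candidate : List Int) (queenId : Int), Dom_getHeuristicCostQueen candidate queenId → Pre_getHeuristicCostQueen candidate queenId → Spec_getHeuristicCostQueen candidate queenId (getHeuristicCostQueen candidate queenId)

-- ===== LEMMAS AND PROOFS =====

-- counting split: pointwise, each A-contribution plus 3 at j = q equals the three B-indicators
theorem pv_countP_three (p pa pb pc : Int → Bool) (q : Int) (l : List Int)
    (h : ∀ j ∈ l, (if p j then (1 : Int) else 0) + (if j = q then 3 else 0)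
        = (if pa j then 1 else 0) + (if pb j then 1 else 0) + (if pc j then 1 else 0)) :
    (l.countP p : Int) + 3 * l.count q
      = (l.countP pa : Int) + (l.countP pb : Int) + (l.countP pc : Int) := by
  induction l with
  | nil => simp
  | cons x t ih =>
    have hx := h x (List.mem_cons_self ..)
    have ih' := ih (fun j hj => h j (List.mem_cons_of_mem _ hj))
    simp only [List.countP_cons, List.count_cons]
    push_cast
    by_cases hq : x = q
    · subst hq
      simp only [beq_self_eq_true] at hx ⊢
      split_ifs at hx ⊢ <;> omega
    · have hb : (x == q) = false := beq_eq_false_iff_ne.mpr hq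
      simp only [hb, Bool.false_eq_true, if_false, if_neg hq] at hx ⊢
      split_ifs at hx ⊢ <;> omega


theorem getHeuristicCostQueen_spec : Claim_equal_getHeuristicCostQueen := by
  intro candidate queenId hdom hpre
  unfold Spec_getHeuristicCostQueen
  by_cases hnil : candidate = []
  · subst hnil
    simp [getHeuristicCostQueen, getHeuristicCostQueen_alt, PySem.List.pyRange]
  · have hq : 0 ≤ queenId ∧ queenId < (candidate.length : Int) := hpre.resolve_left hnil
    unfold getHeuristicCostQueen getHeuristicCostQueen_alt
    rw [if_neg hnil]
    simp only []
    -- A side: the loop is a countP over the index range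
    rw [PySem.List.foldl_congr_mem (g := fun conflicts index =>
      if (!(queenId == index) &&
          (PySem.List.pyGetD candidate queenId 0 == PySem.List.pyGetD candidate index 0 ||
           (PySem.List.pyGetD candidate queenId 0 - PySem.List.pyGetD candidate index 0).natAbs == (index - queenId).natAbs)) then conflicts + 1 else conflicts)
      (h := by intro acc x hx; by_cases h : queenId == x <;> simp [h])]
    rw [PySem.List.foldl_if_add_one]
    -- B side: split the three-dictionary loop into three counter loops and read them off as counts
    rw [PySem.List.foldl_prod_mk
        (f := fun (d : PySem.Dict Int Int) (iv : Int × Int) => d.modify iv.2 0 (· + 1))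
        (g := fun (pr : PySem.Dict Int Int × PySem.Dict Int Int) (iv : Int × Int) =>
          (pr.1.modify (iv.2 - iv.1) 0 (· + 1), pr.2.modify (iv.2 + iv.1) 0 (· + 1)))]
    rw [PySem.List.foldl_prod_mk
        (f := fun (d : PySem.Dict Int Int) (iv : Int × Int) => d.modify (iv.2 - iv.1) 0 (· + 1))
        (g := fun (d : PySem.Dict Int Int) (iv : Int × Int) => d.modify (iv.2 + iv.1) 0 (· + 1))]
    rw [← List.foldl_map (f := fun (iv : Int × Int) => iv.2)
          (g := fun (d : PySem.Dict Int Int) x => d.modify x 0 (· + 1)),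
        ← List.foldl_map (f := fun (iv : Int × Int) => iv.2 - iv.1)
          (g := fun (d : PySem.Dict Int Int) x => d.modify x 0 (· + 1)),
        ← List.foldl_map (f := fun (iv : Int × Int) => iv.2 + iv.1)
          (g := fun (d : PySem.Dict Int Int) x => d.modify x 0 (· + 1))]
    rw [PySem.Dict.getD_foldl_modify_add_one, PySem.Dict.getD_foldl_modify_add_one,
        PySem.Dict.getD_foldl_modify_add_one]
    simp only [PySem.Dict.getD_empty, zero_add]
    rw [PySem.List.enumerate_eq_map_pyRange (d := 0) (xs := candidate)]
    simp only [List.map_map]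
    rw [List.count, List.count, List.count, List.countP_map, List.countP_map, List.countP_map]
    simp only [Function.comp_def, PySem.List.len]
    -- both sides are countP's over the same index range: combine
    have hcount : (PySem.List.pyRange 0 (candidate.length : Int) 1).count queenId = 1 := by
      have hnd : (PySem.List.pyRange 0 (candidate.length : Int) 1).Nodup := by
        rw [PySem.List.pyRange_zero_natCast]
        exact (List.nodup_range).map (fun a b => by exact_mod_cast id)
      have hm : queenId ∈ PySem.List.pyRange 0 (candidate.length : Int) 1 := by
        rw [PySem.List.mem_pyRange_one]; omega
      exact List.count_eq_one_of_mem hnd hm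
    have key := pv_countP_three
      (p := fun index => !(queenId == index) &&
          (PySem.List.pyGetD candidate queenId 0 == PySem.List.pyGetD candidate index 0 ||
           (PySem.List.pyGetD candidate queenId 0 - PySem.List.pyGetD candidate index 0).natAbs == (index - queenId).natAbs))
      (pa := fun j => PySem.List.pyGetD candidate j 0 == PySem.List.pyGetD candidate queenId 0)
      (pb := fun j => PySem.List.pyGetD candidate j 0 - j == PySem.List.pyGetD candidate queenId 0 - queenId)
      (pc := fun j => PySem.List.pyGetD candidate j 0 + j == PySem.List.pyGetD candidate queenId 0 + queenId)
      (q := queenId) (l := PySem.List.pyRange 0 (candidate.length : Int) 1)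
      (h := by
        intro j hj
        simp only []
        by_cases hjq : j = queenId
        · subst hjq
          simp
        · have h1 : ¬(queenId == j) = true := by simp [Ne.symm hjq]
          simp only [beq_iff_eq, if_neg hjq, Bool.and_eq_true, Bool.or_eq_true, Bool.not_eq_true',
            beq_eq_false_iff_ne, ne_eq]
          split_ifs <;> omega)
    rw [hcount] at key
    omega
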